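-- pv_equiv track=rewrite | github.com/fullscreen-triangle/borgia | honjo-masamune/docs/bounded-phase-space-trajectory/validate_bounded_phase_space.py | electron_config
-- ===== SOURCE A (Python) =====
-- def electron_config(Z: int):
--     """Return list of (subshell, electrons) following the Madelung ordering."""
--     ordering = ["1s", "2s", "2p", "3s", "3p", "4s", "3d", "4p",
--                 "5s", "4d", "5p", "6s"]
--     capacity = {"s": 2, "p": 6, "d": 10, "f": 14}
--     out = []
--     remain = Z
--     for shell in ordering:
--         cap = capacity[shell[-1]]
--         take = min(cap, remain)
--         if take > 0:
--             out.append((shell, take))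
--         remain -= take
--         if remain <= 0:
--             break
--     return out
-- ===== SOURCE B (Python) =====
-- def electron_config(Z: int):
--     """Return list of (subshell, electrons) following the Madelung ordering.
--
--     Prefix-sum formulation: precompute cumulative capacity placed before each
--     shell, then clamp Z - before into [0, cap] -- no running 'remain', no break.
--     """
--     ordering = ["1s", "2s", "2p", "3s", "3p", "4s", "3d", "4p",
--                 "5s", "4d", "5p", "6s"]
--     capacity = {"s": 2, "p": 6, "d": 10, "f": 14}
--     caps = [capacity[s[-1]] for s in ordering]
--     befores = [sum(caps[:i]) for i in range(len(caps))]
--     return [(s, e) for s, c, b in zip(ordering, caps, befores)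
--             if (e := max(0, min(c, Z - b))) > 0]
-- ===== Notes on version B (the rewrite author's own statement) =====
-- stated objective: alternative
-- what changed: Replaced the stateful loop with a decremented 'remain' counter and early break by a precomputed prefix-sum table of cumulative capacities and a single clamping comprehension max(0, min(cap, Z - before)).
import Mathlib
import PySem

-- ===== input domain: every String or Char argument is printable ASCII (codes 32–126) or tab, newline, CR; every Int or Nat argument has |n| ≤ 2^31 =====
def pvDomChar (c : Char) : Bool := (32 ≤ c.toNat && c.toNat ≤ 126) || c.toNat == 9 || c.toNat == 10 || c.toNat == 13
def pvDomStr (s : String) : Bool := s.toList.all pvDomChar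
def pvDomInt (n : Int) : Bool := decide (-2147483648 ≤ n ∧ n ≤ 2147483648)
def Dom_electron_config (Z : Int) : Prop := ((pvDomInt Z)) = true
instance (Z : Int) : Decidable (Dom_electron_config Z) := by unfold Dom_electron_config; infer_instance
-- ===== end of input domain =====

-- B replaces A's running 'remain' counter with early break by a prefix-sum table of
-- cumulative capacities plus a clamp max(0, min(cap, Z - before)); alternative decomposition.

-- ===== PORT A =====
-- capacity = {"s": 2, "p": 6, "d": 10, "f": 14}; Python's one-char string keys are
-- modelled as Char (shell[-1] on a nonempty str is one character).
def ecCapacity : PySem.Dict Char Int :=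
  PySem.Dict.ofList [('s', 2), ('p', 6), ('d', 10), ('f', 14)]

-- capacity[shell[-1]]; every shell name ends in a key of the dict, so the
-- .getD defaults (KeyError / IndexError in Python) are never reached.
def ecCap (shell : String) : Int :=
  (ecCapacity.get? ((PySem.Str.pyGet? shell (-1)).getD ' ')).getD 0

-- the for-loop with 'remain', 'take' and the early 'break'
def ecLoop : List String → Int → List (String × Int)
  | [], _ => []
  | shell :: rest, remain =>
    let cap := ecCap shell
    let take := min cap remain
    let out := if take > 0 then [(shell, take)] else []
    if remain - take ≤ 0 then out else out ++ ecLoop rest (remain - take)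

def electron_config (Z : Int) : List (String × Int) :=
  ecLoop ["1s", "2s", "2p", "3s", "3p", "4s", "3d", "4p", "5s", "4d", "5p", "6s"] Z

-- ===== PORT B =====
def ecOrdering : List String :=
  ["1s", "2s", "2p", "3s", "3p", "4s", "3d", "4p", "5s", "4d", "5p", "6s"]

-- caps = [capacity[s[-1]] for s in ordering]
def ecCaps : List Int := ecOrdering.map ecCap

-- befores = [sum(caps[:i]) for i in range(len(caps))]
def ecBefores : List Int :=
  (List.range ecCaps.length).map (fun i => (PySem.List.slice ecCaps none (some (i : Int))).sum)

-- the comprehension over zip(ordering, caps, befores) with the clamp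
def electron_config_alt (Z : Int) : List (String × Int) :=
  ((ecOrdering.zip ecCaps).zip ecBefores).filterMap (fun p =>
    let e := max 0 (min p.1.2 (Z - p.2))
    if e > 0 then some (p.1.1, e) else none)

-- ===== PRECONDITION & SPEC =====
def Spec_electron_config (Z : Int) (out : List (String × Int)) : Prop := out = electron_config_alt Z
instance (Z : Int) (out : List (String × Int)) : Decidable (Spec_electron_config Z out) := by unfold Spec_electron_config; infer_instance

-- ===== CLAIM (what is proved, stated in full; the proofs are below) =====
def Claim_equal_electron_config : Prop := ∀ (Z : Int), Dom_electron_config Z → Spec_electron_config Z (electron_config Z)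

-- ===== LEMMAS AND PROOFS =====

-- bridge loop: B's comprehension with the prefix sum carried as an accumulator b
def ecAltLoop : List String → Int → Int → List (String × Int)
  | [], _, _ => []
  | shell :: rest, b, Z =>
    let c := ecCap shell
    let e := max 0 (min c (Z - b))
    if e > 0 then (shell, e) :: ecAltLoop rest (b + c) Z else ecAltLoop rest (b + c) Z

theorem ecAltLoop_nil {ss : List String} {b Z : Int} (hpos : ∀ s ∈ ss, 0 < ecCap s)
    (h : Z - b ≤ 0) : ecAltLoop ss b Z = [] := by
  induction ss generalizing b with
  | nil => rfl
  | cons s rest ih =>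
    have hc : 0 < ecCap s := hpos s (List.mem_cons_self)
    simp only [ecAltLoop]
    rw [if_neg (by omega)]
    exact ih (fun t ht => hpos t (List.mem_cons_of_mem _ ht)) (by omega)

theorem ecLoop_eq_altLoop (ss : List String) (b Z : Int) (hpos : ∀ s ∈ ss, 0 < ecCap s) :
    ecLoop ss (Z - b) = ecAltLoop ss b Z := by
  induction ss generalizing b with
  | nil => rfl
  | cons s rest ih =>
    have hc : 0 < ecCap s := hpos s (List.mem_cons_self)
    have hrest : ∀ t ∈ rest, 0 < ecCap t := fun t ht => hpos t (List.mem_cons_of_mem _ ht)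
    simp only [ecLoop, ecAltLoop]
    by_cases h0 : Z - b ≤ 0
    · rw [show min (ecCap s) (Z - b) = Z - b by omega]
      rw [if_pos (by omega), if_neg (by omega), if_neg (by omega)]
      exact (ecAltLoop_nil hrest (by omega)).symm
    · by_cases h1 : Z - b ≤ ecCap s
      · rw [show min (ecCap s) (Z - b) = Z - b by omega]
        rw [if_pos (by omega), if_pos (by omega), if_pos (by omega)]
        rw [show max 0 (Z - b) = Z - b by omega, ecAltLoop_nil hrest (by omega)]
      · rw [show min (ecCap s) (Z - b) = ecCap s by omega]
        rw [if_neg (by omega), if_pos (by omega), if_pos (by omega)]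
        rw [show max 0 (ecCap s) = ecCap s by omega,
            show Z - b - ecCap s = Z - (b + ecCap s) by ring, ih _ hrest]
        rfl

-- the prefix sums carried as an accumulator
def ecPrefixes : Int → List Int → List Int
  | _, [] => []
  | b, c :: cs => b :: ecPrefixes (b + c) cs

theorem ec_filterMap_eq_altLoop (Z : Int) (ss : List String) (b : Int) :
    ((ss.zip (ss.map ecCap)).zip (ecPrefixes b (ss.map ecCap))).filterMap (fun p =>
        let e := max 0 (min p.1.2 (Z - p.2))
        if e > 0 then some (p.1.1, e) else none) = ecAltLoop ss b Z := by
  induction ss generalizing b with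
  | nil => rfl
  | cons s rest ih =>
    simp only [List.map_cons, List.zip_cons_cons, ecPrefixes, List.filterMap_cons, ecAltLoop]
    by_cases h : max 0 (min (ecCap s) (Z - b)) > 0
    · rw [if_pos h, if_pos h, ih]
    · rw [if_neg h, if_neg h, ih]

theorem ec_alt_eq_altLoop (Z : Int) : electron_config_alt Z = ecAltLoop ecOrdering 0 Z := by
  have hc : ecCaps = ecOrdering.map ecCap := rfl
  have hb : ecBefores = ecPrefixes 0 (ecOrdering.map ecCap) := by decide
  rw [electron_config_alt, hc, hb]
  exact ec_filterMap_eq_altLoop Z ecOrdering 0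

-- ===== VERDICT (by name: the statement is the Claim_ definition above) =====
theorem electron_config_spec : Claim_equal_electron_config := by
  intro Z _
  unfold Spec_electron_config
  rw [ec_alt_eq_altLoop]
  have := ecLoop_eq_altLoop ecOrdering 0 Z (by decide)
  rw [show Z - 0 = Z by ring] at this
  exact this
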